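-- pv_equiv track=rewrite | github.com/liskos/jakov | ege23/163.py | f
-- ===== SOURCE A (Python) =====
-- def f(a,b,c):
--     if a == b:
--         return 1
--     if a > b :
--         return 0
--     if c:
--         return f(a+1,b,False)+f(a*2,b,False)
--     return f(a+1,b,False)+f(a+2,b,True)+f(a*2,b,False)
-- ===== SOURCE B (Python) =====
-- def f(a, b, c):
--     # Bottom-up DP over states x in [a, b] instead of recomputing subproblems recursively.
--     if b < a:
--         return 0
--     n = b - a
--     f0 = [0] * (n + 1)  # value with c == False at position x = a + i
--     f1 = [0] * (n + 1)  # value with c == True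
--     f0[n] = 1
--     f1[n] = 1
--     for x in range(b - 1, a - 1, -1):
--         i = x - a
--         dbl = f0[2 * x - a] if a <= 2 * x <= b else 0
--         f1[i] = f0[i + 1] + dbl
--         f0[i] = f0[i + 1] + (f1[i + 2] if i + 2 <= n else 0) + dbl
--     return f1[0] if c else f0[0]
-- ===== Notes on version B (the rewrite author's own statement) =====
-- stated objective: alternative
-- what changed: Replaced A's three-way branching recursion by a bottom-up dynamic-programming table over the states x in [a,b] (two arrays for c=False/True), filled once from b down to a, avoiding A's exponential recomputation.
import Mathlib
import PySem

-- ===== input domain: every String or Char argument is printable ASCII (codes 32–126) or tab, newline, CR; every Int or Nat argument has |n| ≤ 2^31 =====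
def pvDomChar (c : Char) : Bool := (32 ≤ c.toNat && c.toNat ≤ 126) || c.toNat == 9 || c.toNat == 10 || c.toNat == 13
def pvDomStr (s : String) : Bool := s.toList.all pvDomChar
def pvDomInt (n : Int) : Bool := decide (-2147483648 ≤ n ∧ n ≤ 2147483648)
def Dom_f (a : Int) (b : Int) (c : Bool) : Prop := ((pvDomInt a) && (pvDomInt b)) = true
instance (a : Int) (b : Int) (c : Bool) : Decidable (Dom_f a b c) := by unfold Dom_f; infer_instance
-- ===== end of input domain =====

-- B replaces A's exponential triple recursion by a bottom-up DP table over the states x ∈ [a,b]; objective: alternative.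

-- ===== PORT A =====
-- A's recursion, with fuel: each recursive step decreases b - a (inside Pre_f), so
-- fuel (b - a).toNat + 1 is always sufficient; fuel-out value 0 is never reached on Pre_f.
def fAux (b : Int) : Nat → Int → Bool → Int
  | 0, _, _ => 0
  | fuel + 1, a, c =>
    if a = b then 1
    else if a > b then 0
    else if c then fAux b fuel (a + 1) false + fAux b fuel (a * 2) false
    else fAux b fuel (a + 1) false + fAux b fuel (a + 2) true + fAux b fuel (a * 2) false

def f (a : Int) (b : Int) (c : Bool) : Int := fAux b ((b - a).toNat + 1) a c

-- ===== PORT B =====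
-- dp step: head of the list is (f0[i], f1[i]) for i = n - k, i.e. x = b - k.
def fAltGo (a b : Int) : Nat → List (Int × Int)
  | 0 => [(1, 1)]
  | k + 1 =>
    let L := fAltGo a b k
    let x : Int := b - (k + 1 : Nat)
    let f0n := (L.getD 0 (0, 0)).1
    let t : Int := if 1 ≤ k then (L.getD 1 (0, 0)).2 else 0
    let dbl : Int :=
      if a ≤ 2 * x ∧ 2 * x ≤ b then
        (if (k : Int) - (b - 2 * x) < 0 then 0
         else (L.getD ((k : Int) - (b - 2 * x)).toNat (0, 0)).1)
      else 0
    (f0n + t + dbl, f0n + dbl) :: L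

def f_alt (a : Int) (b : Int) (c : Bool) : Int :=
  if b < a then 0
  else
    let L := fAltGo a b (b - a).toNat
    if c then (L.getD 0 (0, 0)).2 else (L.getD 0 (0, 0)).1

-- ===== PRECONDITION & SPEC =====
-- Pre_f excludes exactly the inputs a ≤ 0 < b - something: when a < b and a ≤ 1 fails (a ≤ 0),
-- A's call f(a*2,…) never increases a past b, so A raises RecursionError and returns nothing.
def Pre_f (a : Int) (b : Int) (c : Bool) : Prop := 1 ≤ a ∨ b ≤ a
instance (a : Int) (b : Int) (c : Bool) : Decidable (Pre_f a b c) := by unfold Pre_f; infer_instance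
def pvWitness_f : Int × Int × Bool := (1, 6, true)

def Spec_f (a : Int) (b : Int) (c : Bool) (out : Int) : Prop := out = f_alt a b c
instance (a : Int) (b : Int) (c : Bool) (out : Int) : Decidable (Spec_f a b c out) := by unfold Spec_f; infer_instance

-- ===== CLAIM (what is proved, stated in full; the proofs are below) =====
def Claim_equal_f : Prop := ∀ (a : Int) (b : Int) (c : Bool), Dom_f a b c → Pre_f a b c → Spec_f a b c (f a b c)

-- ===== LEMMAS AND PROOFS =====

-- fuel irrelevance: any sufficient fuel gives the same value (needs 1 ≤ a so a*2, a+1, a+2 all shrink b - ·)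
theorem fAux_fuel (b : Int) :
    ∀ (n m : Nat) (a : Int) (c : Bool), 1 ≤ a → (b - a).toNat < n → (b - a).toNat < m →
      fAux b n a c = fAux b m a c := by
  intro n
  induction n with
  | zero => intro m a c _ h; omega
  | succ n ih =>
    intro m a c ha hn hm
    match m with
    | 0 => omega
    | m + 1 =>
      simp only [fAux]
      by_cases hab : a = b
      · simp [hab]
      · simp only [hab, if_false]
        by_cases hgt : a > b
        · simp [hgt]
        · simp only [hgt, if_false]
          have h1 : fAux b n (a + 1) false = fAux b m (a + 1) false :=
            ih m (a + 1) false (by omega) (by omega) (by omega)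
          have h2 : fAux b n (a + 2) true = fAux b m (a + 2) true :=
            ih m (a + 2) true (by omega) (by omega) (by omega)
          have h3 : fAux b n (a * 2) false = fAux b m (a * 2) false :=
            ih m (a * 2) false (by omega) (by omega) (by omega)
          cases c <;> simp [h1, h2, h3]

-- V x c : A's value at state (x, c)
def V (b x : Int) (c : Bool) : Int := fAux b ((b - x).toNat + 1) x c

theorem V_base (b : Int) (c : Bool) : V b b c = 1 := by simp [V, fAux]

theorem V_gt (b x : Int) (c : Bool) (h : x > b) : V b x c = 0 := by
  simp only [V, fAux]
  have : ¬ x = b := by omega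
  simp [this, h]

theorem V_true (b x : Int) (hx : 1 ≤ x) (hlt : x < b) :
    V b x true = V b (x + 1) false + V b (x * 2) false := by
  have h1 : ¬ x = b := by omega
  have h2 : ¬ x > b := by omega
  conv_lhs => rw [V]; simp only [fAux]
  rw [if_neg h1, if_neg h2, if_pos trivial]
  exact congrArg₂ (· + ·)
    (fAux_fuel b _ _ _ _ (by omega) (by omega) (by omega))
    (fAux_fuel b _ _ _ _ (by omega) (by omega) (by omega))

theorem V_false (b x : Int) (hx : 1 ≤ x) (hlt : x < b) :
    V b x false = V b (x + 1) false + V b (x + 2) true + V b (x * 2) false := by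
  have h1 : ¬ x = b := by omega
  have h2 : ¬ x > b := by omega
  conv_lhs => rw [V]; simp only [fAux]
  rw [if_neg h1, if_neg h2, if_neg (by simp : ¬ ((false : Bool) = true))]
  exact congrArg₂ (· + ·)
    (congrArg₂ (· + ·)
      (fAux_fuel b _ _ _ _ (by omega) (by omega) (by omega))
      (fAux_fuel b _ _ _ _ (by omega) (by omega) (by omega)))
    (fAux_fuel b _ _ _ _ (by omega) (by omega) (by omega))

-- main invariant: entry j of fAltGo a b k is (V (b-(k-j)) false, V (b-(k-j)) true)
theorem fAltGo_spec (a b : Int) (ha : 1 ≤ a) :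
    ∀ (k : Nat), (k : Int) ≤ b - a → ∀ (j : Nat), j ≤ k →
      (fAltGo a b k).getD j (0, 0) = (V b (b - ((k : Int) - j)) false, V b (b - ((k : Int) - j)) true) := by
  intro k
  induction k with
  | zero =>
    intro _ j hj
    interval_cases j
    simp [fAltGo, V_base]
  | succ k ih =>
    intro hk j hj
    match j with
    | j + 1 =>
      have : (fAltGo a b (k + 1)).getD (j + 1) (0, 0) = (fAltGo a b k).getD j (0, 0) := by
        simp [fAltGo]
      rw [this, ih (by push_cast; omega) j (by omega)]
      congr 2 <;> push_cast <;> ring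
    | 0 =>
      set x : Int := b - ((k : Nat) + 1 : Nat) with hxdef
      have hx : x = b - (k + 1 : Int) := by rw [hxdef]; push_cast; ring
      have hx1 : 1 ≤ x := by push_cast at hk ⊢; omega
      have hxb : x < b := by omega
      have h0 : (fAltGo a b k).getD 0 (0, 0) = (V b (x + 1) false, V b (x + 1) true) := by
        rw [ih (by push_cast at hk ⊢; omega) 0 (by omega)]
        congr 2 <;> omega
      have hdblc : a ≤ 2 * x ∧ 2 * x ≤ b ↔ 2 * x ≤ b := by omega
      have hdbl :
          (if a ≤ 2 * x ∧ 2 * x ≤ b then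
            (if (k : Int) - (b - 2 * x) < 0 then 0
             else ((fAltGo a b k).getD ((k : Int) - (b - 2 * x)).toNat (0, 0)).1)
           else 0) = V b (x * 2) false := by
        by_cases h2x : 2 * x ≤ b
        · have hpos : ¬ ((k : Int) - (b - 2 * x) < 0) := by omega
          have hjle : ((k : Int) - (b - 2 * x)).toNat ≤ k := by omega
          rw [if_pos (hdblc.mpr h2x), if_neg hpos,
            ih (by push_cast at hk ⊢; omega) _ hjle]
          have : b - ((k : Int) - (((k : Int) - (b - 2 * x)).toNat : Int)) = x * 2 := by omega
          rw [this]
        · rw [if_neg (by omega)]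
          exact (V_gt b (x * 2) false (by omega)).symm
      have ht : (if 1 ≤ k then ((fAltGo a b k).getD 1 (0, 0)).2 else 0) = V b (x + 2) true := by
        by_cases hk1 : 1 ≤ k
        · rw [if_pos hk1, ih (by push_cast at hk ⊢; omega) 1 hk1]
          have : b - ((k : Int) - (1 : Nat)) = x + 2 := by push_cast; omega
          rw [this]
        · rw [if_neg hk1]
          have hk0 : k = 0 := by omega
          exact (V_gt b (x + 2) true (by omega)).symm
      show (let L := fAltGo a b k;
            let x' : Int := b - ((k : Nat) + 1 : Nat);
            let f0n := (L.getD 0 (0, 0)).1;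
            let t : Int := if 1 ≤ k then (L.getD 1 (0, 0)).2 else 0;
            let dbl : Int :=
              if a ≤ 2 * x' ∧ 2 * x' ≤ b then
                (if (k : Int) - (b - 2 * x') < 0 then 0
                 else (L.getD ((k : Int) - (b - 2 * x')).toNat (0, 0)).1)
              else 0;
            ((f0n + t + dbl, f0n + dbl) :: L)).getD 0 (0, 0) = _
      simp only [List.getD_cons_zero, ← hxdef]
      rw [h0]
      simp only []
      rw [ht, hdbl]
      have hj0 : b - (((k : Nat) + 1 : Nat) : Int) - (0 : Nat) = x := by rw [hx]; push_cast; ring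
      have hV0 : V b x false = V b (x + 1) false + V b (x + 2) true + V b (x * 2) false :=
        V_false b x hx1 hxb
      have hV1 : V b x true = V b (x + 1) false + V b (x * 2) false :=
        V_true b x hx1 hxb
      refine Prod.ext ?_ ?_ <;> simp only [] <;> push_cast <;>
        rw [show b - ((k : Int) + 1 - 0) = x by omega]
      · exact hV0.symm
      · exact hV1.symm

-- ===== VERDICT (by name: the statement is the Claim_ definition above) =====
theorem f_spec : Claim_equal_f := by
  intro a b c _ hpre
  unfold Spec_f
  by_cases hba : b < a
  · have h1 : ¬ a = b := by omega
    have h2 : a > b := by omega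
    simp [f, f_alt, fAux, h1, h2]
  · by_cases hab : a = b
    · subst hab
      simp [f, f_alt, fAux, fAltGo]
    · have ha : 1 ≤ a := by rcases hpre with h | h <;> omega
      have hfa : f a b c = V b a c := rfl
      rw [hfa]
      unfold f_alt
      rw [if_neg hba]
      have hspec := fAltGo_spec a b ha (b - a).toNat (by omega) 0 (by omega)
      simp only [hspec]
      have hidx : b - ((((b - a).toNat : Nat) : Int) - ((0 : Nat) : Int)) = a := by
        push_cast; omega
      rw [hidx]
      cases c <;> simp [V]
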